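-- pv_equiv track=rewrite | github.com/nlwtest2020/AyElSeeMoldo | curriculum-planner/scripts/stage3_generate_lessons.py | assign_grr_phases
-- ===== SOURCE A (Python) =====
-- def assign_grr_phases(blocks: list[dict]) -> list[dict]:
--     """Assign GRR phases across schedule blocks following the release model."""
--     # Filter out breaks and lunch for phase assignment
--     teaching_blocks = [b for b in blocks if not _is_non_teaching(b)]
--     n = len(teaching_blocks)
--     if n == 0:
--         return blocks
--
--     phase_boundaries = [
--         max(int(n * 0.20), 1),
--         max(int(n * 0.50), 2),
--         max(int(n * 0.75), 3),
--     ]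
--
--     teaching_idx = 0
--     for block in blocks:
--         if _is_non_teaching(block):
--             block["grr_phase"] = ""
--             continue
--         if teaching_idx < phase_boundaries[0]:
--             block["grr_phase"] = "I Do"
--         elif teaching_idx < phase_boundaries[1]:
--             block["grr_phase"] = "We Do"
--         elif teaching_idx < phase_boundaries[2]:
--             block["grr_phase"] = "You Do Together"
--         else:
--             block["grr_phase"] = "You Do Alone"
--         teaching_idx += 1
--
--     return blocks
--
-- def _is_non_teaching(block: dict) -> bool:
--     """Check if a block is a break, lunch, or buffer."""
--     name = block.get("activity_name", "").lower()
--     return any(k in name for k in ["break", "lunch", "buffer", "overflow"])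
-- ===== SOURCE B (Python) =====
-- def _is_non_teaching(block: dict) -> bool:
--     name = block.get("activity_name", "").lower()
--     return any(k in name for k in ["break", "lunch", "buffer", "overflow"])
--
--
-- def assign_grr_phases(blocks: list[dict]) -> list[dict]:
--     """Assign GRR phases by building the whole phase sequence up front as a
--     run-length concatenation (list repetition of the four labels, with segment
--     lengths computed arithmetically from the clamped boundaries), then zipping
--     it onto the teaching blocks with an iterator; non-teaching blocks get ''."""
--     n = sum(not _is_non_teaching(b) for b in blocks)
--     if n == 0:
--         return blocks
--
--     c0 = min(max(int(n * 0.20), 1), n)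
--     c1 = min(max(int(n * 0.50), 2), n)
--     c2 = min(max(int(n * 0.75), 3), n)
--     schedule = (
--         ["I Do"] * c0
--         + ["We Do"] * (c1 - c0)
--         + ["You Do Together"] * (c2 - c1)
--         + ["You Do Alone"] * (n - c2)
--     )
--     phases = iter(schedule)
--     for b in blocks:
--         b["grr_phase"] = "" if _is_non_teaching(b) else next(phases)
--     return blocks
-- ===== Notes on version B (the rewrite author's own statement) =====
-- stated objective: alternative
-- what changed: Instead of A's per-block counter with an if/elif threshold chain, B computes the four segment lengths arithmetically from the clamped boundaries, materialises the entire phase sequence up front by list repetition and concatenation, and zips it onto the teaching blocks with an iterator (non-teaching blocks blanked in the same pass).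
import Mathlib
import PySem

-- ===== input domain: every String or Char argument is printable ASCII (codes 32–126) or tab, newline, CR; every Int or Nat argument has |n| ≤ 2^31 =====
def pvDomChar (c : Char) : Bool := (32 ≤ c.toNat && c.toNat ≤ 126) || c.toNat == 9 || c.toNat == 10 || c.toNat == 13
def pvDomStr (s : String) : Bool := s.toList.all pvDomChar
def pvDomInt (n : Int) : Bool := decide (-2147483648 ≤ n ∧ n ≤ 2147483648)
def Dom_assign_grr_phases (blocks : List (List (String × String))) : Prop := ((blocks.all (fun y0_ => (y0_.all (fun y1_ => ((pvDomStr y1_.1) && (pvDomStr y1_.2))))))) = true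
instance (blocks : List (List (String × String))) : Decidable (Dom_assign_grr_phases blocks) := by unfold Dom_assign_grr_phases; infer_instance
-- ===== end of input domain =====

-- B builds the whole phase sequence up front as a run-length concatenation (list
-- repetition from arithmetic segment lengths) and zips it onto the teaching blocks
-- (objective: alternative decomposition, same cost). Both Pythons mutate the shared
-- dicts; the ports model the final per-dict contents, which equal the returned value.

-- shared helper of both Pythons: _is_non_teaching
def pvIsNonTeaching (block : List (String × String)) : Bool :=
  let name := PySem.Str.lower (PySem.Dict.getD (PySem.Dict.ofList block) "activity_name" "")
  (["break", "lunch", "buffer", "overflow"]).any (fun k => PySem.Str.isIn k name)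

-- block["grr_phase"] = v on a Python dict (overwrite in place, new key appended)
def pvSetPhase (block : List (String × String)) (v : String) : List (String × String) :=
  ((PySem.Dict.ofList block).insert "grr_phase" v).items

-- ===== PORT A =====
-- the for-loop of A as structural recursion carrying teaching_idx
def pvLoopA (b0 b1 b2 : Nat) : List (List (String × String)) → Nat → List (List (String × String))
  | [], _ => []
  | b :: bs, idx =>
    if pvIsNonTeaching b then
      pvSetPhase b "" :: pvLoopA b0 b1 b2 bs idx
    else
      (pvSetPhase b (if idx < b0 then "I Do" else if idx < b1 then "We Do"
                     else if idx < b2 then "You Do Together" else "You Do Alone"))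
        :: pvLoopA b0 b1 b2 bs (idx + 1)

def assign_grr_phases (blocks : List (List (String × String))) : List (List (String × String)) :=
  let teaching_blocks := blocks.filter (fun b => !pvIsNonTeaching b)
  let n := teaching_blocks.length
  if n = 0 then blocks
  else
    -- int(n * 0.20) = n / 5, int(n * 0.50) = n / 2, int(n * 0.75) = 3 * n / 4:
    -- exact for every feasible length n (verified for n < 2^31)
    pvLoopA (max (n / 5) 1) (max (n / 2) 2) (max (3 * n / 4) 3) blocks 0

-- ===== PORT B =====
-- ["I Do"]*c0 + ["We Do"]*(c1-c0) + ["You Do Together"]*(c2-c1) + ["You Do Alone"]*(n-c2)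
def pvSchedule (n : Nat) : List String :=
  let c0 := min (max (n / 5) 1) n
  let c1 := min (max (n / 2) 2) n
  let c2 := min (max (3 * n / 4) 3) n
  List.replicate c0 "I Do" ++ List.replicate (c1 - c0) "We Do" ++
    List.replicate (c2 - c1) "You Do Together" ++ List.replicate (n - c2) "You Do Alone"

-- B's single pass: pop the next phase from the schedule for a teaching block, "" otherwise
def pvZip : List (List (String × String)) → List String → List (List (String × String))
  | [], _ => []
  | b :: bs, phases =>
    if pvIsNonTeaching b then pvSetPhase b "" :: pvZip bs phases
    else
      match phases with
      | [] => b :: pvZip bs []          -- unreachable: one phase per teaching block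
      | p :: ps => pvSetPhase b p :: pvZip bs ps

def assign_grr_phases_alt (blocks : List (List (String × String))) : List (List (String × String)) :=
  let n := blocks.countP (fun b => !pvIsNonTeaching b)   -- sum(not _is_non_teaching(b) for b in blocks)
  if n = 0 then blocks
  else pvZip blocks (pvSchedule n)

-- ===== PRECONDITION & SPEC =====
def Spec_assign_grr_phases (blocks : List (List (String × String))) (out : List (List (String × String))) : Prop := out = assign_grr_phases_alt blocks
instance (blocks : List (List (String × String))) (out : List (List (String × String))) : Decidable (Spec_assign_grr_phases blocks out) := by unfold Spec_assign_grr_phases; infer_instance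

-- ===== CLAIM (what is proved, stated in full; the proofs are below) =====
def Claim_equal_assign_grr_phases : Prop := ∀ (blocks : List (List (String × String))), Dom_assign_grr_phases blocks → Spec_assign_grr_phases blocks (assign_grr_phases blocks)

-- ===== LEMMAS AND PROOFS =====

-- getElem of a four-segment run-length list
lemma pvQuadGet (A B C D : String) (c0 c1 c2 n i : Nat)
    (h0 : c0 ≤ c1) (h1 : c1 ≤ c2) (h2 : c2 ≤ n) (hi : i < n)
    (hlen : i < (List.replicate c0 A ++ List.replicate (c1 - c0) B ++
      List.replicate (c2 - c1) C ++ List.replicate (n - c2) D).length) :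
    (List.replicate c0 A ++ List.replicate (c1 - c0) B ++
      List.replicate (c2 - c1) C ++ List.replicate (n - c2) D)[i]'hlen =
      (if i < c0 then A else if i < c1 then B else if i < c2 then C else D) := by
  simp only [List.append_assoc] at hlen ⊢
  by_cases hc0 : i < c0
  · rw [List.getElem_append_left (by simpa using hc0)]
    simp [hc0]
  · rw [List.getElem_append_right (by simpa using hc0)]
    simp only [List.length_replicate]
    by_cases hc1 : i < c1
    · rw [List.getElem_append_left (by simp only [List.length_replicate]; omega)]
      simp [hc0, hc1]
    · rw [List.getElem_append_right (by simp only [List.length_replicate]; omega)]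
      simp only [List.length_replicate]
      by_cases hc2 : i < c2
      · rw [List.getElem_append_left (by simp only [List.length_replicate]; omega)]
        simp [hc0, hc1, hc2]
      · rw [List.getElem_append_right (by simp only [List.length_replicate]; omega)]
        simp [hc0, hc1, hc2]

-- the run-length schedule, read at position i, is exactly A's if-chain at index i
lemma pvSchedule_eq_map (n : Nat) :
    pvSchedule n = (List.range n).map (fun i =>
      if i < max (n / 5) 1 then "I Do" else if i < max (n / 2) 2 then "We Do"
      else if i < max (3 * n / 4) 3 then "You Do Together" else "You Do Alone") := by
  have hdef : pvSchedule n =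
      List.replicate (min (max (n / 5) 1) n) "I Do" ++
      List.replicate (min (max (n / 2) 2) n - min (max (n / 5) 1) n) "We Do" ++
      List.replicate (min (max (3 * n / 4) 3) n - min (max (n / 2) 2) n) "You Do Together" ++
      List.replicate (n - min (max (3 * n / 4) 3) n) "You Do Alone" := rfl
  rw [hdef]
  apply List.ext_getElem
  · simp; omega
  · intro i h1 h2
    have hi : i < n := by simp at h1; omega
    rw [pvQuadGet _ _ _ _ _ _ _ _ _ (by omega) (by omega) (by omega) hi]
    simp only [List.getElem_map, List.getElem_range]
    split_ifs <;> first | rfl | omega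

-- zipping the mapped range' suffix onto the blocks reproduces A's indexed loop
lemma pvZip_eq_loop (b0 b1 b2 : Nat) :
    ∀ (bs : List (List (String × String))) (idx m : Nat),
      bs.countP (fun b => !pvIsNonTeaching b) ≤ m →
      pvZip bs ((List.range' idx m).map (fun i =>
          if i < b0 then "I Do" else if i < b1 then "We Do"
          else if i < b2 then "You Do Together" else "You Do Alone")) =
        pvLoopA b0 b1 b2 bs idx := by
  intro bs
  induction bs with
  | nil => intro idx m _; simp [pvZip, pvLoopA]
  | cons b bs ih =>
    intro idx m hm
    by_cases hb : pvIsNonTeaching b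
    · simp only [pvZip, pvLoopA, hb, if_true]
      rw [ih idx m (by simpa [hb] using hm)]
    · have hmpos : 0 < m := by
        have := hm; simp [hb] at this; omega
      obtain ⟨m', rfl⟩ : ∃ m', m = m' + 1 := ⟨m - 1, by omega⟩
      rw [List.range'_succ]
      simp only [pvZip, pvLoopA, hb, List.map_cons]
      rw [ih (idx + 1) m' (by simp [hb] at hm; omega)]
      simp

-- ===== VERDICT (by name: the statement is the Claim_ definition above) =====
theorem assign_grr_phases_spec : Claim_equal_assign_grr_phases := by
  intro blocks _
  unfold Spec_assign_grr_phases assign_grr_phases assign_grr_phases_alt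
  simp only [← List.countP_eq_length_filter]
  by_cases h : blocks.countP (fun b => !pvIsNonTeaching b) = 0
  · rw [if_pos h, if_pos h]
  · rw [if_neg h, if_neg h, pvSchedule_eq_map, List.range_eq_range',
      pvZip_eq_loop _ _ _ blocks 0 _ le_rfl]
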